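-- pv_equiv track=rewrite | github.com/rajbarua/hazelcast-simulator | src/inventory.py | _filter_hosts
-- ===== SOURCE A (Python) =====
-- from typing import Optional, List, Dict
--
-- def _filter_hosts(hosts: List[Dict], host_pattern: str) -> List[Dict]:
--     if not host_pattern:
--         return hosts
--
--     tokens = [token for token in host_pattern.split(":") if token]
--     selected_ids = set()
--     host_id_order = []
--
--     def host_id(h):
--         return f"{h.get('public_ip')}|{h.get('groupname')}"
--
--     # If no include token, default to all
--     has_include = any(not t.startswith("!") for t in tokens)
--     if not tokens or not has_include:
--         for h in hosts:
--             hid = host_id(h)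
--             selected_ids.add(hid)
--             host_id_order.append(hid)
--
--     for token in tokens:
--         exclude = token.startswith("!")
--         name = token[1:] if exclude else token
--         matching = []
--         if name == "all":
--             matching = hosts
--         else:
--             matching = [h for h in hosts if h.get("groupname") == name]
--
--         if exclude:
--             for h in matching:
--                 hid = host_id(h)
--                 if hid in selected_ids:
--                     selected_ids.remove(hid)
--         else:
--             for h in matching:
--                 hid = host_id(h)
--                 if hid not in selected_ids:
--                     selected_ids.add(hid)
--                     host_id_order.append(hid)
--
--     filtered = []
--     for h in hosts:
--         hid = host_id(h)
--         if hid in selected_ids: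
--             filtered.append(h)
--     return filtered
-- ===== SOURCE B (Python) =====
-- from typing import List, Dict
--
-- def _filter_hosts(hosts: List[Dict], host_pattern: str) -> List[Dict]:
--     if not host_pattern:
--         return hosts
--
--     tokens = [t for t in host_pattern.split(":") if t]
--
--     def hid(h):
--         return f"{h.get('public_ip')}|{h.get('groupname')}"
--
--     # One pass over hosts: id list + groupname -> ids index.
--     all_ids = []
--     by_group = {}
--     for h in hosts:
--         i = hid(h)
--         all_ids.append(i)
--         by_group.setdefault(h.get("groupname"), []).append(i)
--
--     selected = set()
--     if all(t.startswith("!") for t in tokens):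
--         selected.update(all_ids)
--
--     for t in tokens:
--         if t.startswith("!"):
--             name = t[1:]
--             ids = all_ids if name == "all" else by_group.get(name, [])
--             selected.difference_update(ids)
--         else:
--             ids = all_ids if t == "all" else by_group.get(t, [])
--             selected.update(ids)
--
--     return [h for h in hosts if hid(h) in selected]
-- ===== Notes on version B (the rewrite author's own statement) =====
-- stated objective: alternative
-- what changed: B builds a groupname->ids index and the id list in one pass over hosts, then resolves each token by a dictionary lookup instead of re-scanning the whole host list per token.
import Mathlib
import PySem

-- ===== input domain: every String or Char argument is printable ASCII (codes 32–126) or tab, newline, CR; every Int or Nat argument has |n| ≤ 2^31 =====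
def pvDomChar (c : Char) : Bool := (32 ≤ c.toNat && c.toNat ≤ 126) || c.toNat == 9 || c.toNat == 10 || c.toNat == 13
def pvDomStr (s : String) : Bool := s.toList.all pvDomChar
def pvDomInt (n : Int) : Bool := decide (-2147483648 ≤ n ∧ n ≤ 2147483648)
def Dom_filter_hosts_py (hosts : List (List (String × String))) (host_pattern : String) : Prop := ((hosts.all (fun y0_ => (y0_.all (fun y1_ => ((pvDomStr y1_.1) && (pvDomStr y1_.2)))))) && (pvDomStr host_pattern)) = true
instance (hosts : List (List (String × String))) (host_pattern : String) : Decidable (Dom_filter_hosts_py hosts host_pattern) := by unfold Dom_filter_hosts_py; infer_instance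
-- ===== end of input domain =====

-- B replaces A's per-token scan of the whole host list by a groupname→ids index built in one pass and per-token lookups (alternative structure; equivalence is about the RETURN value).

-- ===== PORT A =====
-- shared helper: Python's host_id(h) = f"{h.get('public_ip')}|{h.get('groupname')}" (f-string prints None as "None")
def pvHid (h : List (String × String)) : String :=
  (((PySem.Dict.mk h).get? "public_ip").getD "None") ++ "|" ++ (((PySem.Dict.mk h).get? "groupname").getD "None")

-- shared helper: [token for token in host_pattern.split(":") if token]
def pvTokens (host_pattern : String) : List String :=
  ((PySem.Str.split? host_pattern ":").getD []).filter (fun t => t ≠ "")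

-- A's default-all population loop: selected_ids.add(hid); host_id_order.append(hid)
def pvInitA (hosts : List (List (String × String))) : PySem.Set String × List String :=
  hosts.foldl (fun (st : PySem.Set String × List String) h =>
    (st.1.add (pvHid h), st.2 ++ [pvHid h])) (PySem.Set.empty, [])

-- A's body of 'for token in tokens'
def pvStepA (hosts : List (List (String × String))) (st : PySem.Set String × List String)
    (token : String) : PySem.Set String × List String :=
  let exclude := PySem.Str.startswith token "!"
  let name := if exclude then PySem.Str.slice token (some 1) none else token
  let matching := if name = "all" then hosts
    else hosts.filter (fun h => (PySem.Dict.mk h).get? "groupname" == some name)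
  if exclude then
    matching.foldl (fun (st : PySem.Set String × List String) h =>
      if st.1.contains (pvHid h) then (st.1.discard (pvHid h), st.2) else st) st
  else
    matching.foldl (fun (st : PySem.Set String × List String) h =>
      if !(st.1.contains (pvHid h)) then (st.1.add (pvHid h), st.2 ++ [pvHid h]) else st) st

def filter_hosts_py (hosts : List (List (String × String))) (host_pattern : String) : List (List (String × String)) :=
  if host_pattern = "" then hosts else
  let tokens := pvTokens host_pattern
  let has_include := tokens.any (fun t => !(PySem.Str.startswith t "!"))
  let init := if tokens = [] ∨ has_include = false then pvInitA hosts else (PySem.Set.empty, [])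
  let st := tokens.foldl (pvStepA hosts) init
  hosts.filter (fun h => st.1.contains (pvHid h))

-- ===== PORT B =====
-- B's single pass building (all_ids, by_group)
def pvIndexB (hosts : List (List (String × String))) :
    List String × PySem.Dict (Option String) (List String) :=
  hosts.foldl (fun (acc : List String × PySem.Dict (Option String) (List String)) h =>
    let i := pvHid h
    let g := (PySem.Dict.mk h).get? "groupname"
    (acc.1 ++ [i], acc.2.modify g [] (· ++ [i]))) ([], PySem.Dict.empty)

-- B's body of 'for t in tokens'
def pvStepB (all_ids : List String) (by_group : PySem.Dict (Option String) (List String))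
    (s : PySem.Set String) (t : String) : PySem.Set String :=
  if PySem.Str.startswith t "!" then
    let name := PySem.Str.slice t (some 1) none
    let ids := if name = "all" then all_ids else by_group.getD (some name) []
    ids.foldl PySem.Set.discard s
  else
    let ids := if t = "all" then all_ids else by_group.getD (some t) []
    PySem.Set.update s ids

def filter_hosts_py_alt (hosts : List (List (String × String))) (host_pattern : String) : List (List (String × String)) :=
  if host_pattern = "" then hosts else
  let tokens := pvTokens host_pattern
  let acc := pvIndexB hosts
  let all_ids := acc.1
  let by_group := acc.2
  let selected0 : PySem.Set String :=
    if tokens.all (fun t => PySem.Str.startswith t "!") then PySem.Set.update PySem.Set.empty all_ids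
    else PySem.Set.empty
  let selected := tokens.foldl (pvStepB all_ids by_group) selected0
  hosts.filter (fun h => selected.contains (pvHid h))

-- ===== PRECONDITION & SPEC =====
def Spec_filter_hosts_py (hosts : List (List (String × String))) (host_pattern : String) (out : List (List (String × String))) : Prop := out = filter_hosts_py_alt hosts host_pattern
instance (hosts : List (List (String × String))) (host_pattern : String) (out : List (List (String × String))) : Decidable (Spec_filter_hosts_py hosts host_pattern out) := by unfold Spec_filter_hosts_py; infer_instance

-- ===== CLAIM (what is proved, stated in full; the proofs are below) =====
def Claim_equal_filter_hosts_py : Prop := ∀ (hosts : List (List (String × String))) (host_pattern : String), Dom_filter_hosts_py hosts host_pattern → Spec_filter_hosts_py hosts host_pattern (filter_hosts_py hosts host_pattern)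

-- ===== LEMMAS AND PROOFS =====

-- a discard of an absent element is a no-op (PySem.Set.discard is a filter)
theorem pv_discard_of_not_contains {s : PySem.Set String} {x : String}
    (h : s.contains x = false) : s.discard x = s := by
  unfold PySem.Set.discard
  apply List.filter_eq_self.mpr
  intro a ha
  simp only [Bool.not_eq_true', beq_eq_false_iff_ne, ne_eq]
  intro hax
  subst hax
  unfold PySem.Set.contains at h
  simp only [List.contains_eq_mem, decide_eq_false_iff_not] at h
  exact h ha

-- B's one-pass index: all_ids is hosts.map pvHid, by_group the grouping fold
theorem pv_index_spec (hosts : List (List (String × String))) :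
    pvIndexB hosts
    = (hosts.map pvHid,
       hosts.foldl (fun (d : PySem.Dict (Option String) (List String)) h =>
         d.modify ((PySem.Dict.mk h).get? "groupname") [] (· ++ [pvHid h])) PySem.Dict.empty) := by
  unfold pvIndexB
  rw [PySem.List.foldl_prod_mk
    (fun a (h : List (String × String)) => a ++ [pvHid h])
    (fun (d : PySem.Dict (Option String) (List String)) h =>
      d.modify ((PySem.Dict.mk h).get? "groupname") [] (· ++ [pvHid h]))]
  rw [PySem.List.foldl_append_singleton_eq_map]
  rw [List.nil_append]

-- the index lists exactly the ids of the hosts of a given groupname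
theorem pv_index_getD (hosts : List (List (String × String))) (name : String) :
    (hosts.foldl (fun (d : PySem.Dict (Option String) (List String)) h =>
       d.modify ((PySem.Dict.mk h).get? "groupname") [] (· ++ [pvHid h])) PySem.Dict.empty).getD (some name) []
    = (hosts.filter (fun h => (PySem.Dict.mk h).get? "groupname" == some name)).map pvHid := by
  have h1 : (hosts.foldl (fun (d : PySem.Dict (Option String) (List String)) h =>
       d.modify ((PySem.Dict.mk h).get? "groupname") [] (· ++ [pvHid h])) PySem.Dict.empty)
      = (hosts.map (fun h => ((PySem.Dict.mk h).get? "groupname", pvHid h))).foldl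
          (fun d p => d.modify p.1 [] (fun x => x ++ [p.2])) PySem.Dict.empty := by
    rw [List.foldl_map]
  rw [h1, PySem.Dict.getD_foldl_modify_append]
  rw [List.filter_map]
  simp [List.map_map, Function.comp_def]

-- the fst projection of A's include-loop over matching is a Set.update by the matching ids
theorem pv_include_fst (m : List (List (String × String))) (st : PySem.Set String × List String) :
    (m.foldl (fun (st : PySem.Set String × List String) h =>
        if !(st.1.contains (pvHid h)) then (st.1.add (pvHid h), st.2 ++ [pvHid h]) else st) st).1
    = PySem.Set.update st.1 (m.map pvHid) := by
  rw [PySem.Set.update_map_eq_foldl_add]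
  induction m generalizing st with
  | nil => rfl
  | cons h t ih =>
    simp only [List.foldl_cons]
    by_cases hc : st.1.contains (pvHid h) = true
    · have hadd : st.1.add (pvHid h) = st.1 := by
        apply PySem.Set.add_of_mem
        exact (PySem.Set.contains_iff _ _).mp hc
      simp only [hc, Bool.not_true, Bool.false_eq_true, if_false, ih, hadd]
    · simp only [Bool.not_eq_true] at hc
      simp only [hc, Bool.not_false, if_true, ih]

-- the fst projection of A's exclude-loop over matching is a fold of discard over the matching ids
theorem pv_exclude_fst (m : List (List (String × String))) (st : PySem.Set String × List String) :
    (m.foldl (fun (st : PySem.Set String × List String) h =>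
        if st.1.contains (pvHid h) then (st.1.discard (pvHid h), st.2) else st) st).1
    = (m.map pvHid).foldl PySem.Set.discard st.1 := by
  rw [List.foldl_map]
  induction m generalizing st with
  | nil => rfl
  | cons h t ih =>
    simp only [List.foldl_cons]
    by_cases hc : st.1.contains (pvHid h) = true
    · simp only [hc, if_true, ih]
    · simp only [Bool.not_eq_true] at hc
      simp only [hc, Bool.false_eq_true, if_false, ih, pv_discard_of_not_contains hc]

-- A's initial population (fst) equals B's default-all set
theorem pv_init_fst (hosts : List (List (String × String))) :
    (pvInitA hosts).1 = PySem.Set.update PySem.Set.empty (hosts.map pvHid) := by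
  unfold pvInitA
  rw [PySem.Set.update_map_eq_foldl_add]
  rw [PySem.List.foldl_prod_mk (fun (s : PySem.Set String) (h : List (String × String)) => s.add (pvHid h))
    (fun (o : List String) h => o ++ [pvHid h])]

-- the two guards for the default-all population are the same condition
theorem pv_guard_iff (tokens : List String) :
    (tokens = [] ∨ tokens.any (fun t => !(PySem.Str.startswith t "!")) = false)
    ↔ tokens.all (fun t => PySem.Str.startswith t "!") = true := by
  constructor
  · rintro (rfl | h)
    · rfl
    · simp only [List.any_eq_false, Bool.not_eq_true', Bool.not_eq_false] at h
      simpa [List.all_eq_true] using h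
  · intro h
    right
    simp only [List.all_eq_true] at h
    simp only [List.any_eq_false, Bool.not_eq_true', Bool.not_eq_false]
    exact h

-- the selected sets agree token by token
theorem pv_selected_eq (hosts : List (List (String × String))) (tokens : List String)
    (stA : PySem.Set String × List String) (sB : PySem.Set String) (hfst : stA.1 = sB) :
    (tokens.foldl (pvStepA hosts) stA).1
    = tokens.foldl (pvStepB (pvIndexB hosts).1 (pvIndexB hosts).2) sB := by
  induction tokens generalizing stA sB with
  | nil => simpa using hfst
  | cons t ts ih =>
    simp only [List.foldl_cons]
    apply ih
    unfold pvStepA pvStepB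
    rw [pv_index_spec]
    by_cases hex : PySem.Str.startswith t "!" = true
    · simp only [hex, if_true]
      rw [pv_exclude_fst, hfst]
      by_cases hall : PySem.Str.slice t (some 1) none = "all"
      · simp only [hall, if_true]
      · simp only [hall, if_false, pv_index_getD]
    · simp only [hex, Bool.false_eq_true, if_false]
      rw [pv_include_fst, hfst]
      by_cases hall : t = "all"
      · simp only [hall, if_true]
      · simp only [hall, if_false, pv_index_getD]

-- ===== VERDICT (by name: the statement is the Claim_ definition above) =====
theorem filter_hosts_py_spec : Claim_equal_filter_hosts_py := by
  intro hosts host_pattern _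
  unfold Spec_filter_hosts_py filter_hosts_py filter_hosts_py_alt
  by_cases hp : host_pattern = ""
  · simp [hp]
  · simp only [hp, if_false]
    have hinit : (if pvTokens host_pattern = [] ∨ (pvTokens host_pattern).any (fun t => !(PySem.Str.startswith t "!")) = false
          then pvInitA hosts else (PySem.Set.empty, [])).1
        = (if (pvTokens host_pattern).all (fun t => PySem.Str.startswith t "!") then
            PySem.Set.update PySem.Set.empty (pvIndexB hosts).1 else PySem.Set.empty) := by
      rw [pv_index_spec]
      by_cases hg : (pvTokens host_pattern).all (fun t => PySem.Str.startswith t "!") = true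
      · rw [if_pos ((pv_guard_iff _).mpr hg), if_pos hg, pv_init_fst]
      · rw [if_neg (fun hc => hg ((pv_guard_iff _).mp hc)), if_neg hg]
    have hsel := pv_selected_eq hosts (pvTokens host_pattern) _ _ hinit
    rw [hsel]
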